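-- pv_equiv track=rewrite | github.com/kimjune01/june.kim | worklog/h11_heuristic_spanner_v2.py | all_pairs_reach
-- ===== SOURCE A (Python) =====
-- from collections import defaultdict
-- import heapq
--
-- def build_adj(k, edges):
--     adj = defaultdict(list)
--     for (a, b, t) in edges:
--         adj[a].append((b, t))
--         adj[b].append((a, t))
--     return adj
--
-- def temporal_reachable_from(source, adj):
--     best = {source: 0}
--     queue = [(0, source)]
--     heapq.heapify(queue)
--     while queue:
--         t_arr, u = heapq.heappop(queue)
--         if t_arr > best.get(u, float('inf')):
--             continue
--         for (v, t_edge) in adj[u]: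
--             if t_edge >= t_arr:
--                 if t_edge < best.get(v, float('inf')):
--                     best[v] = t_edge
--                     heapq.heappush(queue, (t_edge, v))
--     return set(best.keys())
--
-- def all_pairs_reach(k, edges):
--     adj = build_adj(k, edges)
--     n = 2 * k
--     reach = {}
--     for s in range(n):
--         r = temporal_reachable_from(s, adj)
--         for d in range(n):
--             if s != d:
--                 reach[(s, d)] = d in r
--     return reach
-- ===== SOURCE B (Python) =====
-- def all_pairs_reach(k, edges):
--     # Bellman-Ford-style label correction over the doubled edge list (no heap, no adjacency dict)
--     darts = []
--     for (a, b, t) in edges: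
--         darts.append((a, b, t))
--         darts.append((b, a, t))
--     n = 2 * k
--     reach = {}
--     for s in range(n):
--         best = {s: 0}
--         changed = True
--         while changed:
--             changed = False
--             for (u, v, t) in darts:
--                 if u in best and t >= best[u] and (v not in best or t < best[v]):
--                     best[v] = t
--                     changed = True
--         for d in range(n):
--             if s != d:
--                 reach[(s, d)] = d in best
--     return reach
-- ===== Notes on version B (the rewrite author's own statement) =====
-- stated objective: alternative
-- what changed: Replaced the per-source heap-based earliest-arrival search over an adjacency dict by a Bellman-Ford-style label-correcting fixpoint that repeatedly sweeps the doubled edge list until no relaxation fires (no heap, no adjacency structure).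
import Mathlib
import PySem

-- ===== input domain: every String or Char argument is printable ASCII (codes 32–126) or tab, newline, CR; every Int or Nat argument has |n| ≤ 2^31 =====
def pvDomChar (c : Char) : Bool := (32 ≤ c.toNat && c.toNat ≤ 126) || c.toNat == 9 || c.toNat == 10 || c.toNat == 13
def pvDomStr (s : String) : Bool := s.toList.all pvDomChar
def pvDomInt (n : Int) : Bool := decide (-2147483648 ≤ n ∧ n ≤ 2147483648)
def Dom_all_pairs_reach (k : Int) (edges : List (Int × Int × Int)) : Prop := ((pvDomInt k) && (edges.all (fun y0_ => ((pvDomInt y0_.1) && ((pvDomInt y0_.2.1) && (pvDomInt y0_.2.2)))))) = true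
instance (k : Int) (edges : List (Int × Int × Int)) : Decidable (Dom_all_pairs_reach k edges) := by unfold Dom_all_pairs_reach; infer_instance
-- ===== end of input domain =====

-- B replaces A's per-source heap-based earliest-arrival search over an adjacency dict by a
-- Bellman-Ford-style label-correcting fixpoint sweeping the doubled edge list (objective: alternative).

-- ===== PORT A =====

-- Python tuple comparison (t, u) <= (t', u') on int pairs (lexicographic).
def pvLexLe (a b : Int × Int) : Bool := a.1 < b.1 || (a.1 == b.1 && a.2 ≤ b.2)

-- heapq.heappop: returns the minimum tuple of the heap and the remaining multiset of entries.
-- pvPopMin extracts the minimum value and removes one occurrence of it: value-exact for heappop.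
def pvPopMin : List (Int × Int) → Option ((Int × Int) × List (Int × Int))
  | [] => none
  | x :: xs =>
    match pvPopMin xs with
    | none => some (x, [])
    | some (m, rest) => if pvLexLe x m then some (x, xs) else some (m, x :: rest)

-- build_adj (k unused in Python too): adj[a].append((b, t)); adj[b].append((a, t))
def pvBuildAdj (k : Int) (edges : List (Int × Int × Int)) : PySem.Dict Int (List (Int × Int)) :=
  edges.foldl (fun d e =>
    (d.modify e.1 [] (fun l => l ++ [(e.2.1, e.2.2)])).modify e.2.1 [] (fun l => l ++ [(e.1, e.2.2)]))
    PySem.Dict.empty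

-- the body of 'for (v, t_edge) in adj[u]': relax and push
def pvHeapRelax (t_arr : Int) (st : PySem.Dict Int Int × List (Int × Int)) (p : Int × Int) :
    PySem.Dict Int Int × List (Int × Int) :=
  if t_arr ≤ p.2 then
    match st.1.get? p.1 with
    | none => (st.1.insert p.1 p.2, st.2 ++ [(p.2, p.1)])
    | some bv => if p.2 < bv then (st.1.insert p.1 p.2, st.2 ++ [(p.2, p.1)]) else st
  else st

-- termination measure machinery (cited by pvHeapLoop's decreasing_by)
def pvRank (T : List Int) (b : Option Int) : Nat :=
  match b with
  | none => T.length + 1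
  | some x => T.countP (fun t => decide (t < x))

def pvPhi (nodes T : List Int) (best : PySem.Dict Int Int) : Nat :=
  (nodes.map (fun v => pvRank T (best.get? v))).sum

def pvAdjPairs (adj : PySem.Dict Int (List (Int × Int))) : List (Int × Int) :=
  adj.values.flatMap id

theorem pvPopMin_none {q : List (Int × Int)} : pvPopMin q = none ↔ q = [] := by
  cases q with
  | nil => simp [pvPopMin]
  | cons x xs =>
    simp only [pvPopMin]
    cases pvPopMin xs with
    | none => simp
    | some p =>
      obtain ⟨m, rest⟩ := p
      by_cases hle : pvLexLe x m = true <;> simp [hle]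

theorem pvPopMin_length {q : List (Int × Int)} {m rest} (h : pvPopMin q = some (m, rest)) :
    q.length = rest.length + 1 := by
  induction q generalizing m rest with
  | nil => simp [pvPopMin] at h
  | cons x xs ih =>
    simp only [pvPopMin] at h
    cases hx : pvPopMin xs with
    | none =>
      rw [hx] at h
      obtain rfl : xs = [] := pvPopMin_none.mp hx
      cases h
      simp
    | some p =>
      obtain ⟨m', rest'⟩ := p
      rw [hx] at h
      have hlen := ih hx
      by_cases hle : pvLexLe x m' = true <;> simp [hle] at h <;>
        obtain ⟨rfl, rfl⟩ := h <;> simp [hlen]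

theorem pvCountP_mono (l : List Int) (p q : Int → Bool) (h : ∀ a, p a = true → q a = true) :
    l.countP p ≤ l.countP q := by
  induction l with
  | nil => simp
  | cons a l ih =>
    simp only [List.countP_cons]
    have hif : (if p a = true then (1 : Nat) else 0) ≤ (if q a = true then 1 else 0) := by
      by_cases hp : p a = true
      · simp [hp, h a hp]
      · simp [hp]
    omega

theorem pvCountP_lt_of_mem {T : List Int} {te bv : Int} (hte : te ∈ T) (h : te < bv) :
    T.countP (fun t => decide (t < te)) < T.countP (fun t => decide (t < bv)) := by
  induction T with
  | nil => cases hte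
  | cons a T ih =>
    rcases List.mem_cons.mp hte with rfl | hte
    · have hmono := pvCountP_mono T (fun t => decide (t < te)) (fun t => decide (t < bv))
        (by intro x hx; simp at hx ⊢; omega)
      have hc1 : ¬ (te < te) := by omega
      simp only [List.countP_cons, decide_eq_true_eq, if_neg hc1, if_pos h]
      omega
    · have hih := ih hte
      by_cases ha : a < te
      · have ha2 : a < bv := by omega
        simp only [List.countP_cons, decide_eq_true_eq, if_pos ha, if_pos ha2]
        omega
      · by_cases ha2 : a < bv
        · simp only [List.countP_cons, decide_eq_true_eq, if_neg ha, if_pos ha2]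
          omega
        · simp only [List.countP_cons, decide_eq_true_eq, if_neg ha, if_neg ha2]
          omega

theorem pvRank_lt {T : List Int} {te : Int} {o : Option Int} (hte : te ∈ T)
    (ho : o = none ∨ ∃ bv, o = some bv ∧ te < bv) :
    pvRank T (some te) < pvRank T o := by
  rcases ho with rfl | ⟨bv, rfl, hlt⟩
  · simp only [pvRank]
    have := List.countP_le_length (l := T) (p := fun t => decide (t < te))
    omega
  · exact pvCountP_lt_of_mem hte hlt

theorem pvSum_map_le {α : Type} (l : List α) (f g : α → Nat) (h : ∀ x ∈ l, f x ≤ g x) :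
    (l.map f).sum ≤ (l.map g).sum := by
  induction l with
  | nil => simp
  | cons a l ih =>
    simp only [List.map_cons, List.sum_cons]
    have h1 := h a (List.mem_cons_self ..)
    have h2 := ih (fun x hx => h x (List.mem_cons_of_mem a hx))
    omega

theorem pvSum_map_lt {α : Type} (l : List α) (f g : α → Nat) (h : ∀ x ∈ l, f x ≤ g x)
    {v : α} (hv : v ∈ l) (hlt : f v < g v) : (l.map f).sum < (l.map g).sum := by
  induction l with
  | nil => cases hv
  | cons a l ih =>
    simp only [List.map_cons, List.sum_cons]
    rcases List.mem_cons.mp hv with rfl | hv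
    · have h2 := pvSum_map_le l f g (fun x hx => h x (List.mem_cons_of_mem _ hx))
      omega
    · have h1 := h a (List.mem_cons_self ..)
      have h2 := ih (fun x hx => h x (List.mem_cons_of_mem a hx)) hv
      omega

theorem pvPhi_insert_le (nodes T : List Int) (best : PySem.Dict Int Int) {v te : Int}
    (hte : te ∈ T)
    (hcond : best.get? v = none ∨ ∃ bv, best.get? v = some bv ∧ te < bv) :
    ∀ x ∈ nodes, pvRank T ((best.insert v te).get? x) ≤ pvRank T (best.get? x) := by
  intro x _
  rw [PySem.Dict.get?_insert]
  split
  · subst x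
    exact Nat.le_of_lt (pvRank_lt hte hcond)
  · exact Nat.le_refl _

theorem pvPhi_insert_lt (nodes T : List Int) (best : PySem.Dict Int Int) {v te : Int}
    (hv : v ∈ nodes) (hte : te ∈ T)
    (hcond : best.get? v = none ∨ ∃ bv, best.get? v = some bv ∧ te < bv) :
    pvPhi nodes T (best.insert v te) < pvPhi nodes T best := by
  unfold pvPhi
  refine pvSum_map_lt nodes _ _ (pvPhi_insert_le nodes T best hte hcond) hv ?_
  rw [PySem.Dict.get?_insert]
  simp only [if_pos rfl]
  exact pvRank_lt hte hcond

theorem pvRelax_step_phi (nodes T : List Int) (t_arr : Int) (p : Int × Int)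
    (hp : p.1 ∈ nodes ∧ p.2 ∈ T) (st : PySem.Dict Int Int × List (Int × Int)) :
    pvPhi nodes T (pvHeapRelax t_arr st p).1 + (pvHeapRelax t_arr st p).2.length
      ≤ pvPhi nodes T st.1 + st.2.length := by
  unfold pvHeapRelax
  by_cases ht : t_arr ≤ p.2
  · simp only [if_pos ht]
    cases hg : st.1.get? p.1 with
    | none =>
      have hlt := pvPhi_insert_lt nodes T st.1 hp.1 hp.2 (Or.inl hg)
      simp only [List.length_append, List.length_cons, List.length_nil]
      omega
    | some bv =>
      by_cases hlt : p.2 < bv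
      · simp only [if_pos hlt]
        have hphi := pvPhi_insert_lt nodes T st.1 hp.1 hp.2 (Or.inr ⟨bv, hg, hlt⟩)
        simp only [List.length_append, List.length_cons, List.length_nil]
        omega
      · simp only [if_neg hlt]
        exact Nat.le_refl _
  · simp only [if_neg ht]
    exact Nat.le_refl _

theorem pvRelax_fold_phi (nodes T : List Int) (t_arr : Int) (l : List (Int × Int))
    (hl : ∀ p ∈ l, p.1 ∈ nodes ∧ p.2 ∈ T) (st : PySem.Dict Int Int × List (Int × Int)) :
    pvPhi nodes T (l.foldl (pvHeapRelax t_arr) st).1 + (l.foldl (pvHeapRelax t_arr) st).2.length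
      ≤ pvPhi nodes T st.1 + st.2.length := by
  induction l generalizing st with
  | nil => exact Nat.le_refl _
  | cons p l ih =>
    simp only [List.foldl_cons]
    have h1 := ih (fun q hq => hl q (List.mem_cons_of_mem p hq)) (pvHeapRelax t_arr st p)
    have h2 := pvRelax_step_phi nodes T t_arr p (hl p (List.mem_cons_self ..)) st
    omega

theorem pvGetD_adj_pairs (adj : PySem.Dict Int (List (Int × Int))) (u : Int) :
    ∀ p ∈ adj.getD u [], p.1 ∈ (pvAdjPairs adj).map Prod.fst ∧ p.2 ∈ (pvAdjPairs adj).map Prod.snd := by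
  intro p hp
  rw [PySem.Dict.getD_eq_get?_getD] at hp
  cases hg : adj.get? u with
  | none => rw [hg] at hp; cases hp
  | some lst =>
    rw [hg] at hp
    simp only [Option.getD_some] at hp
    have hitems := PySem.Dict.mem_items_of_get?_eq_some adj hg
    have hval : lst ∈ adj.values := by
      simp only [PySem.Dict.values]
      exact List.mem_map_of_mem hitems
    have hpairs : p ∈ pvAdjPairs adj := by
      simp only [pvAdjPairs, List.mem_flatMap]
      exact ⟨lst, hval, by simpa using hp⟩
    exact ⟨List.mem_map_of_mem hpairs, List.mem_map_of_mem hpairs⟩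

-- the while-queue loop of temporal_reachable_from
def pvHeapLoop (adj : PySem.Dict Int (List (Int × Int))) (best : PySem.Dict Int Int)
    (queue : List (Int × Int)) : PySem.Dict Int Int :=
  match hpop : pvPopMin queue with
  | none => best
  | some ((t_arr, u), rest) =>
    if (match best.get? u with | some bu => decide (bu < t_arr) | none => false) then
      pvHeapLoop adj best rest
    else
      let st := (adj.getD u []).foldl (pvHeapRelax t_arr) (best, rest)
      pvHeapLoop adj st.1 st.2
termination_by pvPhi ((pvAdjPairs adj).map Prod.fst) ((pvAdjPairs adj).map Prod.snd) best + queue.length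
decreasing_by
  · have hlen := pvPopMin_length hpop
    omega
  · have hlen := pvPopMin_length hpop
    have hb := pvRelax_fold_phi ((pvAdjPairs adj).map Prod.fst) ((pvAdjPairs adj).map Prod.snd)
      t_arr (adj.getD u []) (pvGetD_adj_pairs adj u) (best, rest)
    simp only at hb ⊢
    omega

-- Python's defaultdict access adj[u] inserts [] for a missing u; that mutation never changes a
-- later read (missing reads as []), so the port reads adj with getD _ [] and skips the mutation.
def pvTemporalReachableFrom (source : Int) (adj : PySem.Dict Int (List (Int × Int))) : PySem.Set Int :=
  PySem.Set.ofList (pvHeapLoop adj (PySem.Dict.empty.insert source 0) [(0, source)]).keys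

def all_pairs_reach (k : Int) (edges : List (Int × Int × Int)) : List (Int × Int × Bool) :=
  let adj := pvBuildAdj k edges
  let n := 2 * k
  let reach := (PySem.List.pyRange 0 n 1).foldl (fun r s =>
    let rr := pvTemporalReachableFrom s adj
    (PySem.List.pyRange 0 n 1).foldl
      (fun r d => if s ≠ d then r.insert (s, d) (PySem.Set.contains rr d) else r) r)
    (PySem.Dict.empty : PySem.Dict (Int × Int) Bool)
  reach.items.map (fun p => (p.1.1, p.1.2, p.2))

-- ===== PORT B =====

def pvMkDarts (edges : List (Int × Int × Int)) : List (Int × Int × Int) :=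
  edges.foldl (fun acc e => acc ++ [(e.1, e.2.1, e.2.2), (e.2.1, e.1, e.2.2)]) []

-- one edge test of B's sweep: if u in best and t >= best[u] and (v not in best or t < best[v])
def pvBfStep (st : PySem.Dict Int Int × Bool) (e : Int × Int × Int) : PySem.Dict Int Int × Bool :=
  match st.1.get? e.1 with
  | none => st
  | some bu =>
    if decide (bu ≤ e.2.2) &&
        (match st.1.get? e.2.1 with | none => true | some bv => decide (e.2.2 < bv)) then
      (st.1.insert e.2.1 e.2.2, true)
    else st

theorem pvBfStep_phi (nodes T : List Int) (e : Int × Int × Int)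
    (he : e.2.1 ∈ nodes ∧ e.2.2 ∈ T) (st : PySem.Dict Int Int × Bool) :
    pvPhi nodes T (pvBfStep st e).1 ≤ pvPhi nodes T st.1 ∧
      ((pvBfStep st e).2 = true → st.2 = true ∨ pvPhi nodes T (pvBfStep st e).1 < pvPhi nodes T st.1) := by
  unfold pvBfStep
  cases hg : st.1.get? e.1 with
  | none => exact ⟨Nat.le_refl _, fun h => Or.inl h⟩
  | some bu =>
    by_cases hcond : (decide (bu ≤ e.2.2) &&
        (match st.1.get? e.2.1 with | none => true | some bv => decide (e.2.2 < bv))) = true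
    · simp only [if_pos hcond]
      have hc : st.1.get? e.2.1 = none ∨ ∃ bv, st.1.get? e.2.1 = some bv ∧ e.2.2 < bv := by
        rw [Bool.and_eq_true] at hcond
        have h2 := hcond.2
        cases hv : st.1.get? e.2.1 with
        | none => exact Or.inl rfl
        | some bv =>
          rw [hv] at h2
          exact Or.inr ⟨bv, rfl, by simpa using h2⟩
      have hphi := pvPhi_insert_lt nodes T st.1 he.1 he.2 hc
      exact ⟨Nat.le_of_lt hphi, fun _ => Or.inr hphi⟩
    · simp only [if_neg hcond]
      exact ⟨Nat.le_refl _, fun h => Or.inl h⟩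

theorem pvBf_pass_phi (nodes T : List Int) (l : List (Int × Int × Int))
    (hl : ∀ e ∈ l, e.2.1 ∈ nodes ∧ e.2.2 ∈ T) (st : PySem.Dict Int Int × Bool) :
    pvPhi nodes T (l.foldl pvBfStep st).1 ≤ pvPhi nodes T st.1 ∧
      ((l.foldl pvBfStep st).2 = true → st.2 = true ∨
        pvPhi nodes T (l.foldl pvBfStep st).1 < pvPhi nodes T st.1) := by
  induction l generalizing st with
  | nil => exact ⟨Nat.le_refl _, fun h => Or.inl h⟩
  | cons e l ih =>
    simp only [List.foldl_cons]
    have h1 := pvBfStep_phi nodes T e (hl e (List.mem_cons_self ..)) st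
    have h2 := ih (fun x hx => hl x (List.mem_cons_of_mem e hx)) (pvBfStep st e)
    refine ⟨Nat.le_trans h2.1 h1.1, fun hfl => ?_⟩
    rcases h2.2 hfl with hst | hlt
    · rcases h1.2 hst with hst' | hlt'
      · exact Or.inl hst'
      · exact Or.inr (Nat.lt_of_le_of_lt h2.1 hlt')
    · exact Or.inr (Nat.lt_of_lt_of_le hlt h1.1)


-- B's while-changed loop
def pvBfLoop (darts : List (Int × Int × Int)) (best : PySem.Dict Int Int) : PySem.Dict Int Int :=
  if h : (darts.foldl pvBfStep (best, false)).2 = true then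
    pvBfLoop darts (darts.foldl pvBfStep (best, false)).1
  else (darts.foldl pvBfStep (best, false)).1
termination_by pvPhi (darts.map (fun e => e.2.1)) (darts.map (fun e => e.2.2)) best
decreasing_by
  have hb := pvBf_pass_phi (darts.map (fun e => e.2.1)) (darts.map (fun e => e.2.2)) darts
    (by intro e he; exact ⟨List.mem_map_of_mem he, List.mem_map_of_mem he⟩) (best, false)
  rcases hb.2 h with h' | h'
  · simp at h'
  · simp only [List.foldl_attach]
    simpa using h'

def all_pairs_reach_alt (k : Int) (edges : List (Int × Int × Int)) : List (Int × Int × Bool) :=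
  let darts := pvMkDarts edges
  let n := 2 * k
  let reach := (PySem.List.pyRange 0 n 1).foldl (fun r s =>
    let best := pvBfLoop darts (PySem.Dict.empty.insert s 0)
    (PySem.List.pyRange 0 n 1).foldl
      (fun r d => if s ≠ d then r.insert (s, d) (best.contains d) else r) r)
    (PySem.Dict.empty : PySem.Dict (Int × Int) Bool)
  reach.items.map (fun p => (p.1.1, p.1.2, p.2))

-- ===== PRECONDITION & SPEC =====
def Spec_all_pairs_reach (k : Int) (edges : List (Int × Int × Int)) (out : List (Int × Int × Bool)) : Prop := out = all_pairs_reach_alt k edges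
instance (k : Int) (edges : List (Int × Int × Int)) (out : List (Int × Int × Bool)) : Decidable (Spec_all_pairs_reach k edges out) := by unfold Spec_all_pairs_reach; infer_instance

-- ===== CLAIM (what is proved, stated in full; the proofs are below) =====
def Claim_equal_all_pairs_reach : Prop := ∀ (k : Int) (edges : List (Int × Int × Int)), Dom_all_pairs_reach k edges → Spec_all_pairs_reach k edges (all_pairs_reach k edges)

-- ===== LEMMAS AND PROOFS =====

theorem pvPopMin_perm {q : List (Int × Int)} {m rest} (h : pvPopMin q = some (m, rest)) :
    q.Perm (m :: rest) := by
  induction q generalizing m rest with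
  | nil => simp [pvPopMin] at h
  | cons x xs ih =>
    simp only [pvPopMin] at h
    cases hx : pvPopMin xs with
    | none =>
      rw [hx] at h
      obtain rfl : xs = [] := pvPopMin_none.mp hx
      cases h
      rfl
    | some p =>
      obtain ⟨m', rest'⟩ := p
      rw [hx] at h
      have hperm := ih hx
      by_cases hle : pvLexLe x m' = true <;> simp [hle] at h <;> obtain ⟨rfl, rfl⟩ := h
      · rfl
      · exact ((hperm.cons x).trans (List.Perm.swap _ _ _))


-- the undirected temporal edge relation of the input
def pvRel (edges : List (Int × Int × Int)) (u v te : Int) : Prop :=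
  (u, v, te) ∈ edges ∨ (v, u, te) ∈ edges

-- temporal reachability from s: v reachable with arrival time t
inductive pvRT (edges : List (Int × Int × Int)) (s : Int) : Int → Int → Prop
  | src : pvRT edges s s 0
  | step {u t v te : Int} : pvRT edges s u t → pvRel edges u v te → t ≤ te → pvRT edges s v te

def pvInv (edges : List (Int × Int × Int)) (s : Int) (best : PySem.Dict Int Int) : Prop :=
  best.get? s = some 0 ∧ ∀ v t, best.get? v = some t → 0 ≤ t ∧ pvRT edges s v t

def pvQInv (best : PySem.Dict Int Int) (q : List (Int × Int)) : Prop :=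
  ∀ p ∈ q, 0 ≤ p.1 ∧ ∃ tu, best.get? p.2 = some tu ∧ tu ≤ p.1

def pvStabAt (edges : List (Int × Int × Int)) (best : PySem.Dict Int Int) (u tu : Int) : Prop :=
  ∀ v te, pvRel edges u v te → tu ≤ te → ∃ tv, best.get? v = some tv ∧ tv ≤ te

def pvPend (edges : List (Int × Int × Int)) (best : PySem.Dict Int Int)
    (q : List (Int × Int)) : Prop :=
  ∀ u tu, best.get? u = some tu → ((tu, u) ∈ q ∨ pvStabAt edges best u tu)

def pvStable (edges : List (Int × Int × Int)) (best : PySem.Dict Int Int) : Prop :=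
  ∀ u tu, best.get? u = some tu → pvStabAt edges best u tu

def pvMono (b b' : PySem.Dict Int Int) : Prop :=
  ∀ x tx, b.get? x = some tx → ∃ tx', b'.get? x = some tx' ∧ tx' ≤ tx

theorem pvMono_refl (b : PySem.Dict Int Int) : pvMono b b :=
  fun x tx h => ⟨tx, h, Int.le_refl _⟩

theorem pvMono_trans {a b c : PySem.Dict Int Int} (h1 : pvMono a b) (h2 : pvMono b c) :
    pvMono a c := by
  intro x tx h
  obtain ⟨t1, hb, hle1⟩ := h1 x tx h
  obtain ⟨t2, hc, hle2⟩ := h2 x t1 hb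
  exact ⟨t2, hc, Int.le_trans hle2 hle1⟩

theorem pvStabAt_mono {edges b b' u tu} (h : pvStabAt edges b u tu) (hm : pvMono b b') :
    pvStabAt edges b' u tu := by
  intro v te hrel hle
  obtain ⟨tv, hv, hvle⟩ := h v te hrel hle
  obtain ⟨tv', hv', hvle'⟩ := hm v tv hv
  exact ⟨tv', hv', Int.le_trans hvle' hvle⟩

-- the doubled edge list represents exactly pvRel
-- the doubled edge list represents exactly pvRel
theorem pv_mem_mkDarts (edges : List (Int × Int × Int)) (u v t : Int) :
    (u, v, t) ∈ pvMkDarts edges ↔ pvRel edges u v t := by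
  unfold pvMkDarts
  rw [PySem.List.foldl_append_eq_flatMap]
  simp only [List.nil_append, List.mem_flatMap, List.mem_cons, List.not_mem_nil, or_false]
  constructor
  · rintro ⟨⟨a1, a2, a3⟩, ha, h | h⟩ <;> cases h
    · exact Or.inl ha
    · exact Or.inr ha
  · rintro (h | h)
    · exact ⟨(u, v, t), h, Or.inl rfl⟩
    · exact ⟨(v, u, t), h, Or.inr rfl⟩

-- build_adj as one fold over key/value darts
theorem pvBuildAdj_eq (k : Int) (edges : List (Int × Int × Int)) :
    pvBuildAdj k edges =
      (edges.flatMap (fun e => [(e.1, (e.2.1, e.2.2)), (e.2.1, (e.1, e.2.2))])).foldl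
        (fun d p => d.modify p.1 [] (fun l => l ++ [p.2])) PySem.Dict.empty := by
  unfold pvBuildAdj
  generalize PySem.Dict.empty = d
  induction edges generalizing d with
  | nil => rfl
  | cons e es ih => simp only [List.foldl_cons, List.flatMap_cons, List.cons_append,
      List.nil_append, List.foldl_append, ih]

theorem pv_mem_adj (k : Int) (edges : List (Int × Int × Int)) (u v te : Int) :
    (v, te) ∈ (pvBuildAdj k edges).getD u [] ↔ pvRel edges u v te := by
  rw [pvBuildAdj_eq]
  rw [PySem.Dict.getD_foldl_modify_append]
  rw [PySem.Dict.getD_empty]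
  simp only [List.nil_append, List.mem_map, List.mem_filter, List.mem_flatMap, List.mem_cons,
    List.not_mem_nil, or_false]
  constructor
  · rintro ⟨⟨p1, p2⟩, ⟨⟨⟨e1, e2, e3⟩, he, h | h⟩, hbeq⟩, hp2⟩ <;> cases h <;>
      simp only at hp2 hbeq <;> cases hp2 <;> first
    | exact Or.inl (by rwa [eq_of_beq hbeq] at he)
    | exact Or.inr (by rwa [eq_of_beq hbeq] at he)
  · rintro (h | h)
    · exact ⟨(u, (v, te)), ⟨⟨(u, v, te), h, Or.inl rfl⟩, by simp⟩, rfl⟩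
    · exact ⟨(u, (v, te)), ⟨⟨(v, u, te), h, Or.inr rfl⟩, by simp⟩, rfl⟩

-- one relaxation step of A preserves the invariants
theorem pvRelax_step_post (edges : List (Int × Int × Int)) (s u t_arr : Int)
    (p : Int × Int) (hrelp : pvRel edges u p.1 p.2)
    (st : PySem.Dict Int Int × List (Int × Int))
    (hInv : pvInv edges s st.1) (hQ : pvQInv st.1 st.2)
    (hu : st.1.get? u = some t_arr) (ht0 : 0 ≤ t_arr)
    (hPend : ∀ u' tu', st.1.get? u' = some tu' → u' ≠ u →
      ((tu', u') ∈ st.2 ∨ pvStabAt edges st.1 u' tu')) :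
    pvMono st.1 (pvHeapRelax t_arr st p).1 ∧
    pvInv edges s (pvHeapRelax t_arr st p).1 ∧
    pvQInv (pvHeapRelax t_arr st p).1 (pvHeapRelax t_arr st p).2 ∧
    (pvHeapRelax t_arr st p).1.get? u = some t_arr ∧
    (∀ u' tu', (pvHeapRelax t_arr st p).1.get? u' = some tu' → u' ≠ u →
      ((tu', u') ∈ (pvHeapRelax t_arr st p).2 ∨ pvStabAt edges (pvHeapRelax t_arr st p).1 u' tu')) ∧
    (∀ q, q ∈ st.2 → q ∈ (pvHeapRelax t_arr st p).2) ∧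
    (t_arr ≤ p.2 → ∃ tv, (pvHeapRelax t_arr st p).1.get? p.1 = some tv ∧ tv ≤ p.2) := by
  unfold pvHeapRelax
  by_cases ht : t_arr ≤ p.2
  swap
  · simp only [if_neg ht]
    exact ⟨pvMono_refl _, hInv, hQ, hu, hPend, fun q hq => hq, fun hle => absurd hle ht⟩
  simp only [if_pos ht]
  have hupd : ∀ _ : (st.1.get? p.1 = none ∨ ∃ bv, st.1.get? p.1 = some bv ∧ p.2 < bv),
      pvMono st.1 (st.1.insert p.1 p.2) ∧
      pvInv edges s (st.1.insert p.1 p.2) ∧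
      pvQInv (st.1.insert p.1 p.2) (st.2 ++ [(p.2, p.1)]) ∧
      (st.1.insert p.1 p.2).get? u = some t_arr ∧
      (∀ u' tu', (st.1.insert p.1 p.2).get? u' = some tu' → u' ≠ u →
        ((tu', u') ∈ st.2 ++ [(p.2, p.1)] ∨ pvStabAt edges (st.1.insert p.1 p.2) u' tu')) ∧
      (∀ q, q ∈ st.2 → q ∈ st.2 ++ [(p.2, p.1)]) ∧
      (t_arr ≤ p.2 → ∃ tv, (st.1.insert p.1 p.2).get? p.1 = some tv ∧ tv ≤ p.2) := by
    intro hcond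
    have hp1u : p.1 ≠ u := by
      intro hpe
      rcases hcond with hn | ⟨bv, hb, hlt⟩
      · rw [hpe, hu] at hn; cases hn
      · rw [hpe, hu] at hb
        cases hb
        omega
    have hp1s : p.1 ≠ s := by
      intro hpe
      rcases hcond with hn | ⟨bv, hb, hlt⟩
      · rw [hpe, hInv.1] at hn; cases hn
      · rw [hpe, hInv.1] at hb
        cases hb
        omega
    have hmono : pvMono st.1 (st.1.insert p.1 p.2) := by
      intro x tx hx
      rw [PySem.Dict.get?_insert]
      by_cases hxp : x = p.1
      · subst hxp
        rcases hcond with hn | ⟨bv, hb, hlt⟩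
        · rw [hx] at hn; cases hn
        · rw [hx] at hb
          cases hb
          exact ⟨p.2, by simp, by omega⟩
      · rw [if_neg hxp]
        exact ⟨tx, hx, Int.le_refl _⟩
    have hInv' : pvInv edges s (st.1.insert p.1 p.2) := by
      refine ⟨?_, ?_⟩
      · rw [PySem.Dict.get?_insert, if_neg (fun h => hp1s h.symm)]
        exact hInv.1
      · intro v t h
        rw [PySem.Dict.get?_insert] at h
        split at h
        · cases h
          subst v
          exact ⟨by omega, pvRT.step (hInv.2 u t_arr hu).2 hrelp ht⟩
        · exact hInv.2 v t h
    refine ⟨hmono, hInv', ?_, ?_, ?_, fun q hq => List.mem_append_left _ hq, ?_⟩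
    · intro q hq
      rcases List.mem_append.mp hq with hq | hq
      · obtain ⟨h0, tu, htu, hle⟩ := hQ q hq
        obtain ⟨tu', htu', hle'⟩ := hmono q.2 tu htu
        exact ⟨h0, tu', htu', by omega⟩
      · simp only [List.mem_cons, List.not_mem_nil, or_false] at hq
        subst hq
        exact ⟨by omega, p.2, PySem.Dict.get?_insert_self .., Int.le_refl _⟩
    · rw [PySem.Dict.get?_insert, if_neg (fun h => hp1u h.symm)]
      exact hu
    · intro u' tu' h hne
      by_cases hup : u' = p.1
      · subst hup
        rw [PySem.Dict.get?_insert_self] at h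
        cases h
        exact Or.inl (List.mem_append_right _ (List.mem_cons_self ..))
      · rw [PySem.Dict.get?_insert, if_neg hup] at h
        rcases hPend u' tu' h hne with hin | hst
        · exact Or.inl (List.mem_append_left _ hin)
        · exact Or.inr (pvStabAt_mono hst hmono)
    · intro _
      exact ⟨p.2, PySem.Dict.get?_insert_self .., Int.le_refl _⟩
  cases hg : st.1.get? p.1 with
  | none => exact hupd (Or.inl hg)
  | some bv =>
    by_cases hlt : p.2 < bv
    · simp only [if_pos hlt]
      exact hupd (Or.inr ⟨bv, hg, hlt⟩)
    · simp only [if_neg hlt]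
      exact ⟨pvMono_refl _, hInv, hQ, hu, hPend, fun q hq => hq, fun _ => ⟨bv, hg, by omega⟩⟩

-- folding A's relaxation over an adjacency list
theorem pvRelax_fold_post (edges : List (Int × Int × Int)) (s u t_arr : Int)
    (l : List (Int × Int)) (hrel : ∀ p ∈ l, pvRel edges u p.1 p.2)
    (st : PySem.Dict Int Int × List (Int × Int))
    (hInv : pvInv edges s st.1) (hQ : pvQInv st.1 st.2)
    (hu : st.1.get? u = some t_arr) (ht0 : 0 ≤ t_arr)
    (hPend : ∀ u' tu', st.1.get? u' = some tu' → u' ≠ u →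
      ((tu', u') ∈ st.2 ∨ pvStabAt edges st.1 u' tu')) :
    pvMono st.1 (l.foldl (pvHeapRelax t_arr) st).1 ∧
    pvInv edges s (l.foldl (pvHeapRelax t_arr) st).1 ∧
    pvQInv (l.foldl (pvHeapRelax t_arr) st).1 (l.foldl (pvHeapRelax t_arr) st).2 ∧
    (l.foldl (pvHeapRelax t_arr) st).1.get? u = some t_arr ∧
    (∀ u' tu', (l.foldl (pvHeapRelax t_arr) st).1.get? u' = some tu' → u' ≠ u →
      ((tu', u') ∈ (l.foldl (pvHeapRelax t_arr) st).2 ∨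
        pvStabAt edges (l.foldl (pvHeapRelax t_arr) st).1 u' tu')) ∧
    (∀ p ∈ l, t_arr ≤ p.2 →
      ∃ tv, (l.foldl (pvHeapRelax t_arr) st).1.get? p.1 = some tv ∧ tv ≤ p.2) := by
  induction l generalizing st with
  | nil =>
    exact ⟨pvMono_refl _, hInv, hQ, hu, fun u' tu' h hne => hPend u' tu' h hne,
      fun p hp => absurd hp (by simp)⟩
  | cons p l ih =>
    have hstep := pvRelax_step_post edges s u t_arr p (hrel p (List.mem_cons_self ..)) st
      hInv hQ hu ht0 hPend
    obtain ⟨hm1, hI1, hQ1, hu1, hP1, hq1, hlast1⟩ := hstep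
    have hrest := ih (fun q hq => hrel q (List.mem_cons_of_mem _ hq)) (pvHeapRelax t_arr st p)
      hI1 hQ1 hu1 hP1
    obtain ⟨hm2, hI2, hQ2, hu2, hP2, hlast2⟩ := hrest
    simp only [List.foldl_cons]
    refine ⟨pvMono_trans hm1 hm2, hI2, hQ2, hu2, hP2, ?_⟩
    intro q hq hle
    rcases List.mem_cons.mp hq with rfl | hq
    · obtain ⟨tv, hv, hvle⟩ := hlast1 hle
      obtain ⟨tv', hv', hvle'⟩ := hm2 q.1 tv hv
      exact ⟨tv', hv', Int.le_trans hvle' hvle⟩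
    · exact hlast2 q hq hle

theorem pvHeapLoop_post (edges : List (Int × Int × Int)) (k s : Int) :
    ∀ (best : PySem.Dict Int Int) (q : List (Int × Int)),
      pvInv edges s best → pvQInv best q → pvPend edges best q →
      pvInv edges s (pvHeapLoop (pvBuildAdj k edges) best q) ∧
        pvStable edges (pvHeapLoop (pvBuildAdj k edges) best q) := by
  intro best q
  induction best, q using pvHeapLoop.induct (pvBuildAdj k edges) with
  | case1 best q hpop =>
    intro hInv hQ hPend
    rw [pvHeapLoop]
    split
    case h_2 => rename_i heq; rw [hpop] at heq; cases heq
    case h_1 =>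
    obtain rfl : q = [] := pvPopMin_none.mp hpop
    refine ⟨hInv, ?_⟩
    intro u tu hu
    rcases hPend u tu hu with hin | hst
    · cases hin
    · exact hst
  | case2 best q t_arr u rest hpop hstale ih =>
    intro hInv hQ hPend
    rw [pvHeapLoop]
    split
    case h_1 => rename_i heq; rw [hpop] at heq; cases heq
    case h_2 =>
    rename_i t' u' rest' heq
    rw [hpop] at heq
    injection heq with heq'
    cases heq'
    rw [if_pos hstale]
    have hperm := pvPopMin_perm hpop
    have hQ' : pvQInv best rest :=
      fun p hp => hQ p (hperm.mem_iff.mpr (List.mem_cons_of_mem _ hp))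
    refine ih hInv hQ' ?_
    intro u' tu' h
    rcases hPend u' tu' h with hin | hst
    · rcases List.mem_cons.mp (hperm.mem_iff.mp hin) with heq | hin'
      · exfalso
        obtain ⟨h1, h2⟩ := Prod.mk.injEq .. ▸ heq
        subst h1
        subst h2
        rw [h] at hstale
        simp at hstale
      · exact Or.inl hin'
    · exact Or.inr hst
  | case3 best q t_arr u rest hpop hstale st ih =>
    intro hInv hQ hPend
    rw [pvHeapLoop]
    split
    case h_1 => rename_i heq; rw [hpop] at heq; cases heq
    case h_2 =>
    rename_i t' u' rest' heq
    rw [hpop] at heq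
    injection heq with heq'
    cases heq'
    rw [if_neg hstale]
    have hperm := pvPopMin_perm hpop
    have hpopped : (t_arr, u) ∈ q := hperm.mem_iff.mpr (List.mem_cons_self ..)
    obtain ⟨h0, tu, htu, hle⟩ := hQ (t_arr, u) hpopped
    have htarr : tu = t_arr := by
      by_contra hc
      apply hstale
      rw [htu]
      have : tu < t_arr := by simp at h0 hle ⊢; omega
      simpa using this
    subst htarr
    have hQ' : pvQInv best rest :=
      fun p hp => hQ p (hperm.mem_iff.mpr (List.mem_cons_of_mem _ hp))
    have hPendX : ∀ u' tu', best.get? u' = some tu' → u' ≠ u →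
        ((tu', u') ∈ rest ∨ pvStabAt edges best u' tu') := by
      intro u' tu' h hne
      rcases hPend u' tu' h with hin | hst
      · rcases List.mem_cons.mp (hperm.mem_iff.mp hin) with heq | hin'
        · exfalso
          obtain ⟨h1, h2⟩ := Prod.mk.injEq .. ▸ heq
          exact hne h2
        · exact Or.inl hin'
      · exact Or.inr hst
    have hrel : ∀ p ∈ (pvBuildAdj k edges).getD u [], pvRel edges u p.1 p.2 := by
      rintro ⟨pv, pt⟩ hp
      exact (pv_mem_adj k edges u pv pt).mp hp
    have h00 : (0 : Int) ≤ tu := by simpa using h0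
    have hfold := pvRelax_fold_post edges s u tu ((pvBuildAdj k edges).getD u []) hrel
      (best, rest) hInv hQ' htu h00 hPendX
    obtain ⟨hm, hI, hQ2, hu2, hP2, hlast⟩ := hfold
    refine ih hI hQ2 ?_
    intro u' tu' h
    by_cases hne : u' = u
    · subst hne
      rw [hu2] at h
      cases h
      refine Or.inr ?_
      intro v te hrelv hle2
      exact hlast (v, te) ((pv_mem_adj k edges u' v te).mpr hrelv) hle2
    · exact hP2 u' tu' h hne

theorem pvComplete (edges : List (Int × Int × Int)) (s : Int) (best : PySem.Dict Int Int)
    (h0 : best.get? s = some 0) (hst : pvStable edges best) :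
    ∀ v t, pvRT edges s v t → ∃ tv, best.get? v = some tv ∧ tv ≤ t := by
  intro v t h
  induction h with
  | src => exact ⟨0, h0, Int.le_refl 0⟩
  | step hr hrel hle ih =>
    obtain ⟨tu, hu, hule⟩ := ih
    exact hst _ tu hu _ _ hrel (by omega)

theorem pvInit_inv (edges : List (Int × Int × Int)) (s : Int) :
    pvInv edges s (PySem.Dict.empty.insert s 0) := by
  constructor
  · exact PySem.Dict.get?_insert_self ..
  · intro v t h
    rw [PySem.Dict.get?_insert] at h
    split at h
    · cases h
      subst v
      exact ⟨Int.le_refl 0, pvRT.src⟩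
    · rw [PySem.Dict.get?_empty] at h
      cases h

-- final characterisation of A's per-source reachable key set
theorem pvHeap_char (edges : List (Int × Int × Int)) (k s v : Int) :
    (∃ t, (pvHeapLoop (pvBuildAdj k edges) (PySem.Dict.empty.insert s 0) [(0, s)]).get? v = some t)
      ↔ ∃ t, pvRT edges s v t := by
  have hQ : pvQInv (PySem.Dict.empty.insert s 0) [(0, s)] := by
    intro p hp
    simp only [List.mem_cons, List.not_mem_nil, or_false] at hp
    subst hp
    exact ⟨Int.le_refl 0, 0, PySem.Dict.get?_insert_self .., Int.le_refl 0⟩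
  have hP : pvPend edges (PySem.Dict.empty.insert s 0) [(0, s)] := by
    intro u tu h
    rw [PySem.Dict.get?_insert] at h
    split at h
    · cases h
      subst u
      exact Or.inl (List.mem_cons_self ..)
    · rw [PySem.Dict.get?_empty] at h
      cases h
  obtain ⟨hInv, hStable⟩ := pvHeapLoop_post edges k s _ _ (pvInit_inv edges s) hQ hP
  constructor
  · rintro ⟨t, ht⟩
    exact ⟨t, (hInv.2 v t ht).2⟩
  · rintro ⟨t, ht⟩
    obtain ⟨tv, hv, _⟩ := pvComplete edges s _ hInv.1 hStable v t ht
    exact ⟨tv, hv⟩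

-- ========== B side ==========

theorem pvBfStep_inv (edges : List (Int × Int × Int)) (s : Int) (e : Int × Int × Int)
    (he : pvRel edges e.1 e.2.1 e.2.2) (st : PySem.Dict Int Int × Bool)
    (hInv : pvInv edges s st.1) : pvInv edges s (pvBfStep st e).1 := by
  unfold pvBfStep
  cases hg : st.1.get? e.1 with
  | none => exact hInv
  | some bu =>
    by_cases hcond : (decide (bu ≤ e.2.2) &&
        (match st.1.get? e.2.1 with | none => true | some bv => decide (e.2.2 < bv))) = true
    · simp only [if_pos hcond]
      rw [Bool.and_eq_true] at hcond
      have hbu := hInv.2 e.1 bu hg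
      have hble : bu ≤ e.2.2 := by simpa using hcond.1
      have hvne : e.2.1 ≠ s := by
        intro hvs
        subst hvs
        have h2 := hcond.2
        rw [hInv.1] at h2
        have : e.2.2 < 0 := by simpa using h2
        omega
      constructor
      · rw [PySem.Dict.get?_insert, if_neg (by exact fun h => hvne h.symm)]
        exact hInv.1
      · intro v t h
        rw [PySem.Dict.get?_insert] at h
        split at h
        · cases h
          subst v
          exact ⟨by omega, pvRT.step hbu.2 he hble⟩
        · exact hInv.2 v t h
    · simp only [if_neg hcond]
      exact hInv

theorem pvBf_pass_inv (edges : List (Int × Int × Int)) (s : Int) (l : List (Int × Int × Int))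
    (hl : ∀ e ∈ l, pvRel edges e.1 e.2.1 e.2.2) :
    ∀ st : PySem.Dict Int Int × Bool, pvInv edges s st.1 →
      pvInv edges s (l.foldl pvBfStep st).1 := by
  induction l with
  | nil => exact fun st h => h
  | cons e l ih =>
    intro st h
    simp only [List.foldl_cons]
    exact ih (fun x hx => hl x (List.mem_cons_of_mem _ hx)) _
      (pvBfStep_inv edges s e (hl e (List.mem_cons_self ..)) st h)

theorem pvBf_flag_mono (l : List (Int × Int × Int)) :
    ∀ st : PySem.Dict Int Int × Bool, st.2 = true → (l.foldl pvBfStep st).2 = true := by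
  induction l with
  | nil => exact fun st h => h
  | cons e l ih =>
    intro st h
    simp only [List.foldl_cons]
    refine ih _ ?_
    unfold pvBfStep
    cases hg : st.1.get? e.1 with
    | none => exact h
    | some bu =>
      show (if (decide (bu ≤ e.2.2) &&
          (match st.1.get? e.2.1 with | none => true | some bv => decide (e.2.2 < bv))) = true
          then (st.1.insert e.2.1 e.2.2, true) else st).2 = true
      by_cases hcond : (decide (bu ≤ e.2.2) &&
          (match st.1.get? e.2.1 with | none => true | some bv => decide (e.2.2 < bv))) = true
      · rw [if_pos hcond]
      · rw [if_neg hcond]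
        exact h

theorem pvBf_pass_false (l : List (Int × Int × Int)) :
    ∀ b : PySem.Dict Int Int, (l.foldl pvBfStep (b, false)).2 = false →
      (l.foldl pvBfStep (b, false)).1 = b ∧
      ∀ e ∈ l, ∀ bu, b.get? e.1 = some bu → bu ≤ e.2.2 →
        ∃ bv, b.get? e.2.1 = some bv ∧ bv ≤ e.2.2 := by
  induction l with
  | nil => exact fun b _ => ⟨rfl, fun e he => absurd he (by simp)⟩
  | cons e l ih =>
    intro b hfl
    simp only [List.foldl_cons] at hfl ⊢
    cases hg : b.get? e.1 with
    | none =>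
      have hred : pvBfStep (b, false) e = (b, false) := by
        simp only [pvBfStep, hg]
      rw [hred] at hfl ⊢
      obtain ⟨h1, h2⟩ := ih b hfl
      refine ⟨h1, fun e' he' => ?_⟩
      rcases List.mem_cons.mp he' with rfl | he'
      · intro bu hbu
        rw [hg] at hbu
        cases hbu
      · exact h2 e' he'
    | some bu =>
      by_cases hcond : (decide (bu ≤ e.2.2) &&
          (match b.get? e.2.1 with | none => true | some bv => decide (e.2.2 < bv))) = true
      · exfalso
        have hred : pvBfStep (b, false) e = (b.insert e.2.1 e.2.2, true) := by
          simp only [pvBfStep, hg, if_pos hcond]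
        rw [hred] at hfl
        rw [pvBf_flag_mono l _ rfl] at hfl
        cases hfl
      · have hred : pvBfStep (b, false) e = (b, false) := by
          simp only [pvBfStep, hg, if_neg hcond]
        rw [hred] at hfl ⊢
        obtain ⟨h1, h2⟩ := ih b hfl
        refine ⟨h1, fun e' he' => ?_⟩
        rcases List.mem_cons.mp he' with rfl | he'
        · intro bu' hbu' hle
          rw [hg] at hbu'
          cases hbu'
          cases hv : b.get? e'.2.1 with
          | none =>
            exfalso
            apply hcond
            rw [Bool.and_eq_true]
            exact ⟨by simpa using hle, by simp [hv]⟩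
          | some bv =>
            refine ⟨bv, rfl, ?_⟩
            by_contra hc
            apply hcond
            rw [Bool.and_eq_true]
            refine ⟨by simpa using hle, ?_⟩
            simp [hv]
            omega
        · exact h2 e' he'

theorem pvBfLoop_post (edges : List (Int × Int × Int)) (s : Int)
    (darts : List (Int × Int × Int))
    (hd : ∀ e ∈ darts, pvRel edges e.1 e.2.1 e.2.2)
    (hd2 : ∀ u v te, pvRel edges u v te → (u, v, te) ∈ darts) :
    ∀ best : PySem.Dict Int Int, pvInv edges s best →
      pvInv edges s (pvBfLoop darts best) ∧ pvStable edges (pvBfLoop darts best) := by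
  intro best
  induction best using pvBfLoop.induct darts with
  | case1 best hfl ih =>
    intro hInv
    simp only [List.foldl_attach] at hfl ih
    rw [pvBfLoop]
    rw [dif_pos hfl]
    exact ih (pvBf_pass_inv edges s darts hd (best, false) hInv)
  | case2 best hfl =>
    intro hInv
    rw [pvBfLoop]
    rw [dif_neg hfl]
    have hfalse : (darts.foldl pvBfStep (best, false)).2 = false := by
      simpa using hfl
    obtain ⟨heq, hstab⟩ := pvBf_pass_false darts best hfalse
    rw [heq]
    refine ⟨hInv, ?_⟩
    intro u tu hu v te hrel hle
    exact hstab (u, v, te) (hd2 u v te hrel) tu hu hle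

theorem pvBf_char (edges : List (Int × Int × Int)) (s v : Int) :
    (∃ t, (pvBfLoop (pvMkDarts edges) (PySem.Dict.empty.insert s 0)).get? v = some t)
      ↔ ∃ t, pvRT edges s v t := by
  have hd : ∀ e ∈ pvMkDarts edges, pvRel edges e.1 e.2.1 e.2.2 := by
    intro e he
    have := (pv_mem_mkDarts edges e.1 e.2.1 e.2.2).mp (by simpa using he)
    exact this
  have hd2 : ∀ u v te, pvRel edges u v te → (u, v, te) ∈ pvMkDarts edges := by
    intro u v te h
    exact (pv_mem_mkDarts edges u v te).mpr h
  obtain ⟨hInv, hStable⟩ := pvBfLoop_post edges s _ hd hd2 _ (pvInit_inv edges s)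
  constructor
  · rintro ⟨t, ht⟩
    exact ⟨t, (hInv.2 v t ht).2⟩
  · rintro ⟨t, ht⟩
    obtain ⟨tv, hv, _⟩ := pvComplete edges s _ hInv.1 hStable v t ht
    exact ⟨tv, hv⟩

-- ========== booleans and assembly ==========

theorem pv_keys_iff (b : PySem.Dict Int Int) (d : Int) :
    d ∈ b.keys ↔ ∃ t, b.get? d = some t := by
  constructor
  · intro h
    cases hg : b.get? d with
    | none => exact absurd h ((PySem.Dict.get?_eq_none_iff_not_mem_keys ..).mp hg)
    | some t => exact ⟨t, rfl⟩
  · rintro ⟨t, ht⟩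
    by_contra hc
    rw [(PySem.Dict.get?_eq_none_iff_not_mem_keys ..).mpr hc] at ht
    cases ht

theorem pv_contains_eq (k : Int) (edges : List (Int × Int × Int)) (s d : Int) :
    PySem.Set.contains (pvTemporalReachableFrom s (pvBuildAdj k edges)) d =
      (pvBfLoop (pvMkDarts edges) (PySem.Dict.empty.insert s 0)).contains d := by
  have hA := pvHeap_char edges k s d
  have hB := pvBf_char edges s d
  rw [Bool.eq_iff_iff]
  unfold pvTemporalReachableFrom
  constructor
  · intro h
    have hd' : d ∈ PySem.Set.ofList
        (pvHeapLoop (pvBuildAdj k edges) (PySem.Dict.empty.insert s 0) [(0, s)]).keys := by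
      simpa [PySem.Set.contains] using h
    have hd : d ∈ (pvHeapLoop (pvBuildAdj k edges) (PySem.Dict.empty.insert s 0) [(0, s)]).keys := by
      rwa [PySem.Set.mem_ofList] at hd'
    have hreach := hA.mp (pv_keys_iff _ _ |>.mp hd)
    have hex := hB.mpr hreach
    rw [PySem.Dict.contains_iff_mem_keys]
    exact (pv_keys_iff _ _).mpr hex
  · intro h
    have hex := hB.mp ((pv_keys_iff _ _).mp ((PySem.Dict.contains_iff_mem_keys ..).mp h))
    have hd := (pv_keys_iff _ _).mpr (hA.mpr hex)
    simp only [PySem.Set.contains]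
    simp only [List.contains_iff_mem, decide_eq_true_eq]
    rwa [PySem.Set.mem_ofList]

theorem all_pairs_reach_main : ∀ (k : Int) (edges : List (Int × Int × Int)),
    all_pairs_reach k edges = all_pairs_reach_alt k edges := by
  intro k edges
  simp only [all_pairs_reach, all_pairs_reach_alt]
  have hfun : (fun (r : PySem.Dict (Int × Int) Bool) (s : Int) =>
      (PySem.List.pyRange 0 (2 * k) 1).foldl
        (fun r d => if s ≠ d then
          r.insert (s, d) (PySem.Set.contains (pvTemporalReachableFrom s (pvBuildAdj k edges)) d)
        else r) r) =
      (fun (r : PySem.Dict (Int × Int) Bool) (s : Int) =>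
      (PySem.List.pyRange 0 (2 * k) 1).foldl
        (fun r d => if s ≠ d then
          r.insert (s, d) ((pvBfLoop (pvMkDarts edges) (PySem.Dict.empty.insert s 0)).contains d)
        else r) r) := by
    funext r s
    have : (fun (r : PySem.Dict (Int × Int) Bool) (d : Int) => if s ≠ d then
          r.insert (s, d) (PySem.Set.contains (pvTemporalReachableFrom s (pvBuildAdj k edges)) d)
        else r) =
        (fun (r : PySem.Dict (Int × Int) Bool) (d : Int) => if s ≠ d then
          r.insert (s, d) ((pvBfLoop (pvMkDarts edges) (PySem.Dict.empty.insert s 0)).contains d)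
        else r) := by
      funext r d
      rw [pv_contains_eq]
    rw [this]
  rw [hfun]

-- ===== VERDICT (by name: the statement is the Claim_ definition above) =====
theorem all_pairs_reach_spec : Claim_equal_all_pairs_reach := by
  intro k edges _
  unfold Spec_all_pairs_reach
  exact all_pairs_reach_main k edges
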